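-- pv_equiv track=rewrite | github.com/MeviusS/university-tasks | packages/strings.py | twin_chars
-- ===== SOURCE A (Python) =====
-- def twin_chars(string):
--     str_len = len(string)
--     i = 0
--     while i != str_len:
--         if i == str_len - 1 or string[i] != string[i + 1]:
--             return False
--         i += 2
--     return True
-- ===== SOURCE B (Python) =====
-- def twin_chars(string):
--     return string[::2] == string[1::2]
-- ===== Notes on version B (the rewrite author's own statement) =====
-- stated objective: simpler
-- what changed: Replaces the explicit index loop with early return by a single comparison of the even-indexed and odd-indexed strided slices.
import Mathlib
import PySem

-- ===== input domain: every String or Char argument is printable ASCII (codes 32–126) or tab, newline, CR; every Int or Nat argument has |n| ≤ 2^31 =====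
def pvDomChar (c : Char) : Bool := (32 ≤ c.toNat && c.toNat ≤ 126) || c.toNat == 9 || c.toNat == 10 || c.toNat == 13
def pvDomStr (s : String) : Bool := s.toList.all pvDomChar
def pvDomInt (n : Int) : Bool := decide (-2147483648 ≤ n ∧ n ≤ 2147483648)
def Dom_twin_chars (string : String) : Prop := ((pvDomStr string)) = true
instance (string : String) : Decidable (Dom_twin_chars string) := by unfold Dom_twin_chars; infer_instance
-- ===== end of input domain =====

-- B replaces A's explicit index loop by a single comparison of the two strided
-- slices string[::2] and string[1::2] (objective: simpler).

-- ===== PORT A =====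
-- A's while loop over index i (step 2; early False when i is the last index or
-- the pair s[i], s[i+1] mismatches) as the obvious two-step recursion on the characters.
def twinLoopA : List Char → Bool
  | [] => true
  | [_] => false
  | a :: b :: rest => if a ≠ b then false else twinLoopA rest

def twin_chars (string : String) : Bool := twinLoopA string.toList

-- ===== PORT B =====
-- Source B: return string[::2] == string[1::2]
def twin_chars_alt (string : String) : Bool :=
  PySem.Str.slice? string none none 2 == PySem.Str.slice? string (some 1) none 2

-- ===== PRECONDITION & SPEC =====
def Spec_twin_chars (string : String) (out : Bool) : Prop := out = twin_chars_alt string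
instance (string : String) (out : Bool) : Decidable (Spec_twin_chars string out) := by unfold Spec_twin_chars; infer_instance

-- ===== CLAIM (what is proved, stated in full; the proofs are below) =====
def Claim_equal_twin_chars : Prop := ∀ (string : String), Dom_twin_chars string → Spec_twin_chars string (twin_chars string)

-- ===== LEMMAS AND PROOFS =====

/-- The even-indexed characters (what `s[::2]` selects). -/
def evens : List Char → List Char
  | [] => []
  | [a] => [a]
  | a :: _ :: rest => a :: evens rest

/-- The odd-indexed characters (what `s[1::2]` selects). -/
def odds : List Char → List Char
  | [] => []
  | [_] => []
  | _ :: b :: rest => b :: odds rest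

theorem evens_length : ∀ xs : List Char, (evens xs).length = (xs.length + 1) / 2
  | [] => rfl
  | [_] => by simp [evens]
  | _ :: _ :: rest => by simp [evens, evens_length rest]; omega

theorem odds_length : ∀ xs : List Char, (odds xs).length = xs.length / 2
  | [] => rfl
  | [_] => by simp [odds]
  | _ :: _ :: rest => by simp [odds, odds_length rest]; omega

theorem evens_getElem? : ∀ (xs : List Char) (i : Nat), (evens xs)[i]? = xs[2 * i]?
  | [], i => by simp [evens]
  | [a], i => by cases i with
    | zero => rfl
    | succ j => simp [evens, show 2 * (j+1) = 2*j+1+1 by omega]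
  | a :: b :: rest, i => by
    cases i with
    | zero => rfl
    | succ j =>
      have h := evens_getElem? rest j
      simp [evens, Nat.mul_succ]
      simpa [show 2 * j + 2 - 1 - 1 = 2 * j by omega] using h

theorem odds_getElem? : ∀ (xs : List Char) (i : Nat), (odds xs)[i]? = xs[2 * i + 1]?
  | [], i => by simp [odds]
  | [_], i => by cases i <;> simp [odds]
  | a :: b :: rest, i => by
    cases i with
    | zero => rfl
    | succ j =>
      have h := odds_getElem? rest j
      simp [odds, Nat.mul_succ]
      simpa [show 2 * j + 2 + 1 - 1 - 1 = 2 * j + 1 by omega] using h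

/-- `filterMap getElem?` over the full index range reproduces the list. -/
theorem filterMap_getElem?_range : ∀ (ys : List Char),
    List.filterMap (fun k => ys[k]?) (List.range ys.length) = ys := by
  intro ys
  induction ys using List.reverseRecOn with
  | nil => simp
  | append_singleton l x ih =>
    rw [List.length_append, List.length_singleton, List.range_succ, List.filterMap_append]
    rw [List.filterMap_congr (g := fun k => l[k]?) (by
      intro k hk
      exact List.getElem?_append_left (List.mem_range.mp hk))]
    simp [ih]

/-- `s[::2]` is exactly the even-indexed characters. -/
theorem slice?_even (s : List Char) : PySem.List.slice? s none none 2 = some (evens s) := by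
  simp only [PySem.List.slice?, PySem.List.sliceIndices]
  norm_num
  rw [show (if 0 < s.length then (((s.length:Int) + 2 - 1) / 2).toNat else 0) = (evens s).length by
    rw [evens_length]; split <;> omega]
  rw [List.filterMap_congr (g := fun k => (evens s)[k]?) ?_]
  · exact filterMap_getElem?_range (evens s)
  · intro k hk
    show s[(2 * (k:Int)).toNat]? = (evens s)[k]?
    rw [evens_getElem? s k, show (2 * (k:Int)).toNat = 2 * k by omega]

/-- `s[1::2]` is exactly the odd-indexed characters. -/
theorem slice?_odd (s : List Char) : PySem.List.slice? s (some 1) none 2 = some (odds s) := by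
  cases s with
  | nil => rfl
  | cons a t =>
    simp only [PySem.List.slice?, PySem.List.sliceIndices]
    norm_num
    rw [show (if 0 < t.length then (((t.length:Int) + 2 - 1) / 2).toNat else 0) = (odds (a::t)).length by
      rw [odds_length]; split <;> simp <;> omega]
    rw [List.filterMap_congr (g := fun k => (odds (a::t))[k]?) ?_]
    · exact filterMap_getElem?_range (odds (a::t))
    · intro k hk
      show (a::t)[(1 + 2 * (k:Int)).toNat]? = (odds (a::t))[k]?
      rw [odds_getElem?, show (1 + 2 * (k:Int)).toNat = 2 * k + 1 by omega]

/-- A's pair-by-pair scan says exactly: the even and odd subsequences coincide. -/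
theorem twinLoopA_eq : ∀ l : List Char, twinLoopA l = (evens l == odds l)
  | [] => by decide
  | [a] => by simp [twinLoopA, evens, odds]
  | a :: b :: rest => by
    by_cases h : a = b <;>
      simp [twinLoopA, evens, odds, h, twinLoopA_eq rest]

-- ===== VERDICT (by name: the statement is the Claim_ definition above) =====
theorem twin_chars_spec : Claim_equal_twin_chars := by
  intro s _
  unfold Spec_twin_chars twin_chars twin_chars_alt
  rw [twinLoopA_eq]
  simp only [PySem.Str.slice?, PySem.Chars.slice?, slice?_even, slice?_odd, Option.map_some]
  cases hb : (evens s.toList == odds s.toList) <;>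
    simp_all [String.ofList_inj]
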